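-- pv_equiv track=rewrite | github.com/sdouf5054/20252R0136DATA30400 | tfidf_baseline_fast.py | add_parent_labels
-- ===== SOURCE A (Python) =====
-- def add_parent_labels(labels, child2parent):
--     """Add all parent labels based on hierarchy"""
--     final_labels = set(labels)
--     for label in labels:
--         current = label
--         while current in child2parent:
--             parent = child2parent[current]
--             final_labels.add(parent)
--             current = parent
--     return sorted(list(final_labels))
-- ===== SOURCE B (Python) =====
-- def add_parent_labels(labels, child2parent):
--     """Add all parent labels based on hierarchy (level-by-level frontier saturation)."""
--     final_labels = set(labels)
--     frontier = set(labels)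
--     while frontier:
--         frontier = {child2parent[c] for c in frontier if c in child2parent} - final_labels
--         final_labels |= frontier
--     return sorted(final_labels)
-- ===== Notes on version B (the rewrite author's own statement) =====
-- stated objective: alternative
-- what changed: B replaces A's per-label upward chain walks by a level-by-level frontier saturation (BFS over the parent map): each round maps the whole frontier through the dict and keeps only the nodes not yet collected, so every node is expanded at most once; A re-walks the full parent chain of every label. (Pre_ excludes inputs where a parent cycle is reachable from a label: there A's while loop never terminates, while B still returns.)
import Mathlib
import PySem

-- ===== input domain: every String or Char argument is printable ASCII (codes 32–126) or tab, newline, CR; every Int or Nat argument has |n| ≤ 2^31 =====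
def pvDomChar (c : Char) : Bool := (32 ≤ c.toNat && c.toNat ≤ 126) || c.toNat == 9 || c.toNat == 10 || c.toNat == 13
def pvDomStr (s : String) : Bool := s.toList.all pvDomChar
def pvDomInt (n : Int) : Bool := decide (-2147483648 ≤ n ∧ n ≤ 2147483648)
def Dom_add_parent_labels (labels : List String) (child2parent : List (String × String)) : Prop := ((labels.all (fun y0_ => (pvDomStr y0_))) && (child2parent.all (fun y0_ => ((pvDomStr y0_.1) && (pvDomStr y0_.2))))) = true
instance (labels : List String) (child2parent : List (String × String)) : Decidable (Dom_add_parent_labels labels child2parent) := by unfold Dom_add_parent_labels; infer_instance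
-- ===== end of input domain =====

-- B replaces A's per-label upward chain walks by a level-by-level frontier saturation
-- (BFS over the parent map), a different traversal; the sorted result set is the same.


-- ===== PORT A =====
-- A's inner 'while current in child2parent' loop; fuel child2parent.length + 1 is
-- enough for every chain that terminates (Pre_ below), so the port is exact there.
def pvAWalk (d : PySem.Dict String String) : Nat → PySem.Set String → String → PySem.Set String
  | 0, s, _ => s
  | fuel+1, s, current =>
    match PySem.Dict.get? d current with
    | none => s
    | some parent => pvAWalk d fuel (PySem.Set.add s parent) parent

def add_parent_labels (labels : List String) (child2parent : List (String × String)) : List String :=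
  let d := PySem.Dict.mk child2parent
  let final := labels.foldl (fun s l => pvAWalk d (child2parent.length + 1) s l)
    (PySem.Set.ofList labels)
  PySem.List.sorted final (fun x => x) false

-- ===== PORT B =====
-- one round of B's while loop: the new frontier (parents of the old one, minus what
-- is already collected) and the enlarged final set
def pvParents (d : PySem.Dict String String) (fr : PySem.Set String) : PySem.Set String :=
  fr.foldl (fun s c =>
    match PySem.Dict.get? d c with
    | some p => PySem.Set.add s p
    | none => s) PySem.Set.empty

def pvRound (d : PySem.Dict String String) (st : PySem.Set String × PySem.Set String) :
    PySem.Set String × PySem.Set String :=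
  (PySem.Set.union st.1 (PySem.Set.diff (pvParents d st.2) st.1),
   PySem.Set.diff (pvParents d st.2) st.1)

-- B's 'while frontier:' loop; fuel child2parent.length + 2 is enough on Pre_ inputs
-- (the frontier is provably empty after child2parent.length + 1 rounds there)
def pvBLoop (d : PySem.Dict String String) : Nat → PySem.Set String × PySem.Set String → PySem.Set String
  | 0, st => st.1
  | fuel+1, st => if st.2 = [] then st.1 else pvBLoop d fuel (pvRound d st)

def add_parent_labels_alt (labels : List String) (child2parent : List (String × String)) : List String :=
  let d := PySem.Dict.mk child2parent
  let final := pvBLoop d (child2parent.length + 2)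
    (PySem.Set.ofList labels, PySem.Set.ofList labels)
  PySem.List.sorted final (fun x => x) false

-- ===== PRECONDITION & SPEC =====
-- one parent-step (identity on non-keys, only used at key nodes)
def pvStep (d : PySem.Dict String String) (x : String) : String :=
  (PySem.Dict.get? d x).getD x

-- Pre_ excludes exactly the inputs on which A's while loop never exits (a parent
-- cycle reachable from some label): each label's ancestor chain must leave the
-- key set within child2parent.length steps (acyclicity from the labels).
def Pre_add_parent_labels (labels : List String) (child2parent : List (String × String)) : Prop :=
  ∀ l ∈ labels, ∃ k ≤ child2parent.length,
    PySem.Dict.get? (PySem.Dict.mk child2parent) ((pvStep (PySem.Dict.mk child2parent))^[k] l) = none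

instance (labels : List String) (child2parent : List (String × String)) : Decidable (Pre_add_parent_labels labels child2parent) := by unfold Pre_add_parent_labels; infer_instance

def pvWitness_add_parent_labels : List String × (List (String × String)) :=
  (["b", "x"], [("b", "c"), ("c", "d")])

def Spec_add_parent_labels (labels : List String) (child2parent : List (String × String)) (out : List String) : Prop := out = add_parent_labels_alt labels child2parent
instance (labels : List String) (child2parent : List (String × String)) (out : List String) : Decidable (Spec_add_parent_labels labels child2parent out) := by unfold Spec_add_parent_labels; infer_instance

-- ===== CLAIM (what is proved, stated in full; the proofs are below) =====
def Claim_equal_add_parent_labels : Prop := ∀ (labels : List String) (child2parent : List (String × String)), Dom_add_parent_labels labels child2parent → Pre_add_parent_labels labels child2parent → Spec_add_parent_labels labels child2parent (add_parent_labels labels child2parent)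

-- ===== LEMMAS AND PROOFS =====

-- ground truth: the list of ancestors of x found within `fuel` steps
def pvAnc (d : PySem.Dict String String) : Nat → String → List String
  | 0, _ => []
  | fuel+1, x =>
    match PySem.Dict.get? d x with
    | none => []
    | some p => p :: pvAnc d fuel p

-- the target predicate: y is a label or an ancestor of one
def pvQ (d : PySem.Dict String String) (labels : List String) (N : Nat) (y : String) : Prop :=
  y ∈ labels ∨ ∃ l ∈ labels, y ∈ pvAnc d N l

theorem pvAWalk_eq_update (d : PySem.Dict String String) :
    ∀ (f : Nat) (s : PySem.Set String) (x : String),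
      pvAWalk d f s x = PySem.Set.update s (pvAnc d f x) := by
  intro f
  induction f with
  | zero => intro s x; simp [pvAWalk, pvAnc, PySem.Set.update_nil]
  | succ f ih =>
    intro s x
    cases hget : PySem.Dict.get? d x with
    | none => simp [pvAWalk, pvAnc, hget, PySem.Set.update_nil]
    | some p => simp [pvAWalk, pvAnc, hget, ih, PySem.Set.update_cons]

theorem pvAnc_closed (d : PySem.Dict String String) :
    ∀ (m : Nat) (l : String), (∃ k ≤ m, PySem.Dict.get? d ((pvStep d)^[k] l) = none) →
      ∀ c ∈ pvAnc d m l, ∀ p, PySem.Dict.get? d c = some p → p ∈ pvAnc d m l := by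
  intro m
  induction m with
  | zero => intro l _ c hc; simp [pvAnc] at hc
  | succ m ih =>
    intro l hex c hc p hp
    cases hget : PySem.Dict.get? d l with
    | none => simp [pvAnc, hget] at hc
    | some q =>
      obtain ⟨k, hk, hkx⟩ := hex
      obtain ⟨k', rfl⟩ : ∃ k', k = k' + 1 := by
        cases k with
        | zero => simp only [Function.iterate_zero, id] at hkx; rw [hget] at hkx; cases hkx
        | succ k' => exact ⟨k', rfl⟩
      have hstep : pvStep d l = q := by simp [pvStep, hget]
      rw [Function.iterate_succ_apply, hstep] at hkx
      have hexq : ∃ k ≤ m, PySem.Dict.get? d ((pvStep d)^[k] q) = none := ⟨k', by omega, hkx⟩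
      simp only [pvAnc, hget, List.mem_cons] at hc ⊢
      rcases hc with rfl | hc
      · obtain ⟨m', rfl⟩ : ∃ m', m = m' + 1 := by
          cases m with
          | zero =>
            obtain ⟨k2, hk2, h2⟩ := hexq
            have hk20 : k2 = 0 := by omega
            subst hk20
            simp only [Function.iterate_zero, id] at h2
            rw [hp] at h2; cases h2
          | succ m' => exact ⟨m', rfl⟩
        right; simp [pvAnc, hp]
      · exact Or.inr (ih q hexq c hc p hp)

theorem pvAnc_mem_closed (d : PySem.Dict String String) (C : List String)
    (hC : ∀ c ∈ C, ∀ p, PySem.Dict.get? d c = some p → p ∈ C) :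
    ∀ (m : Nat) (x : String), x ∈ C → ∀ y ∈ pvAnc d m x, y ∈ C := by
  intro m
  induction m with
  | zero => intro x _ y hy; simp [pvAnc] at hy
  | succ m ih =>
    intro x hx y hy
    cases hget : PySem.Dict.get? d x with
    | none => simp [pvAnc, hget] at hy
    | some p =>
      simp only [pvAnc, hget, List.mem_cons] at hy
      have hp : p ∈ C := hC x hx p hget
      rcases hy with rfl | hy
      · exact hp
      · exact ih p hp y hy

-- A's fold: membership and nodup
theorem pvFoldA_mem (d : PySem.Dict String String) (M : Nat) :
    ∀ (ls : List String) (s : PySem.Set String) (y : String),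
      (y ∈ ls.foldl (fun s l => pvAWalk d M s l) s ↔ y ∈ s ∨ ∃ l ∈ ls, y ∈ pvAnc d M l) := by
  intro ls
  induction ls with
  | nil => intro s y; simp
  | cons l ls ih =>
    intro s y
    simp only [List.foldl_cons]
    rw [ih, pvAWalk_eq_update, PySem.Set.mem_update]
    simp only [List.exists_mem_cons_iff]
    tauto

theorem pvFoldA_nodup (d : PySem.Dict String String) (M : Nat) :
    ∀ (ls : List String) (s : PySem.Set String), s.Nodup →
      (ls.foldl (fun s l => pvAWalk d M s l) s).Nodup := by
  intro ls
  induction ls with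
  | nil => intro s h; exact h
  | cons l ls ih =>
    intro s h
    simp only [List.foldl_cons]
    rw [pvAWalk_eq_update]
    exact ih _ (PySem.Set.nodup_update s (pvAnc d M l) h)

-- parents of a frontier (the set comprehension inside pvRound)
theorem pvParents_mem (d : PySem.Dict String String) :
    ∀ (fr : List String) (s : PySem.Set String) (y : String),
      (y ∈ fr.foldl (fun s c =>
        match PySem.Dict.get? d c with
        | some p => PySem.Set.add s p
        | none => s) s ↔ y ∈ s ∨ ∃ c ∈ fr, PySem.Dict.get? d c = some y) := by
  intro fr
  induction fr with
  | nil => intro s y; simp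
  | cons c fr ih =>
    intro s y
    cases hget : PySem.Dict.get? d c with
    | none =>
      simp only [List.foldl_cons, hget]
      rw [ih]
      simp only [List.exists_mem_cons_iff, hget]
      tauto
    | some p =>
      simp only [List.foldl_cons, hget]
      rw [ih, PySem.Set.mem_add]
      simp only [List.exists_mem_cons_iff, hget, Option.some.injEq]
      constructor
      · rintro ((h | rfl) | h)
        · exact Or.inl h
        · exact Or.inr (Or.inl rfl)
        · exact Or.inr (Or.inr h)
      · rintro (h | (rfl | h))
        · exact Or.inl (Or.inl h)
        · exact Or.inl (Or.inr rfl)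
        · exact Or.inr h

-- B's loop only grows final
theorem pvBLoop_mono (d : PySem.Dict String String) :
    ∀ (fuel : Nat) (st : PySem.Set String × PySem.Set String) (y : String),
      y ∈ st.1 → y ∈ pvBLoop d fuel st := by
  intro fuel
  induction fuel with
  | zero => intro st y hy; exact hy
  | succ fuel ih =>
    intro st y hy
    simp only [pvBLoop]
    split
    · exact hy
    · refine ih (pvRound d st) y ?_
      simp only [pvRound]
      rw [PySem.Set.mem_union]
      exact Or.inl hy

theorem pvBLoop_nodup (d : PySem.Dict String String) :
    ∀ (fuel : Nat) (st : PySem.Set String × PySem.Set String),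
      st.1.Nodup → (pvBLoop d fuel st).Nodup := by
  intro fuel
  induction fuel with
  | zero => intro st h; exact h
  | succ fuel ih =>
    intro st h
    simp only [pvBLoop]
    split
    · exact h
    · exact ih (pvRound d st) (PySem.Set.nodup_union _ _ h)

-- soundness: the loop only ever adds labels/ancestors (Q is parent-closed)
theorem pvBLoop_sound (d : PySem.Dict String String) (Q : String → Prop)
    (hQ : ∀ c, Q c → ∀ p, PySem.Dict.get? d c = some p → Q p) :
    ∀ (fuel : Nat) (st : PySem.Set String × PySem.Set String),
      (∀ y ∈ st.1, Q y) → (∀ y ∈ st.2, Q y) →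
      ∀ y ∈ pvBLoop d fuel st, Q y := by
  intro fuel
  induction fuel with
  | zero => intro st h1 _ y hy; exact h1 y hy
  | succ fuel ih =>
    intro st h1 h2 y hy
    simp only [pvBLoop] at hy
    split at hy
    · exact h1 y hy
    · have hfr : ∀ z ∈ (pvRound d st).2, Q z := by
        intro z hz
        simp only [pvRound] at hz
        rw [PySem.Set.mem_diff] at hz
        obtain ⟨hz1, _⟩ := hz
        rw [pvParents, pvParents_mem] at hz1
        rcases hz1 with h | ⟨c, hc, hcz⟩
        · simp [PySem.Set.empty] at h
        · exact hQ c (h2 c hc) z hcz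
      refine ih (pvRound d st) ?_ hfr y hy
      intro z hz
      simp only [pvRound] at hz
      rw [PySem.Set.mem_union] at hz
      rcases hz with h | h
      · exact h1 z h
      · exact hfr z (by simp only [pvRound]; exact h)

-- completeness: if the frontier empties within the fuel, the result is parent-closed
theorem pvBLoop_closed (d : PySem.Dict String String) :
    ∀ (fuel : Nat) (st : PySem.Set String × PySem.Set String),
      (∀ c ∈ st.1, ∀ p, PySem.Dict.get? d c = some p → p ∈ st.1 ∨ c ∈ st.2) →
      (∃ j < fuel, ((pvRound d)^[j] st).2 = []) →
      ∀ c ∈ pvBLoop d fuel st, ∀ p, PySem.Dict.get? d c = some p → p ∈ pvBLoop d fuel st := by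
  intro fuel
  induction fuel with
  | zero =>
    intro st _ hex
    obtain ⟨j, hj, _⟩ := hex; omega
  | succ fuel ih =>
    intro st hinv hex c hc p hp
    by_cases hemp : st.2 = ([] : List String)
    · simp only [pvBLoop, if_pos hemp] at hc ⊢
      rcases hinv c hc p hp with h | h
      · exact h
      · rw [hemp] at h; cases h
    · simp only [pvBLoop, if_neg hemp] at hc ⊢
      obtain ⟨j, hj, hje⟩ := hex
      obtain ⟨j', rfl⟩ : ∃ j', j = j' + 1 := by
        cases j with
        | zero => simp only [Function.iterate_zero, id] at hje; exact absurd hje hemp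
        | succ j' => exact ⟨j', rfl⟩
      rw [Function.iterate_succ_apply] at hje
      refine ih (pvRound d st) ?_ ⟨j', by omega, hje⟩ c hc p hp
      intro c' hc' p' hp'
      simp only [pvRound] at hc' ⊢
      rw [PySem.Set.mem_union] at hc'
      rcases hc' with h | h
      · rcases hinv c' h p' hp' with hf | hf
        · refine Or.inl ?_
          rw [PySem.Set.mem_union]
          exact Or.inl hf
        · by_cases hpf : p' ∈ st.1
          · refine Or.inl ?_
            rw [PySem.Set.mem_union]
            exact Or.inl hpf
          · refine Or.inl ?_
            rw [PySem.Set.mem_union]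
            refine Or.inr ?_
            rw [PySem.Set.mem_diff]
            refine ⟨?_, hpf⟩
            rw [pvParents, pvParents_mem]
            exact Or.inr ⟨c', hf, hp'⟩
      · exact Or.inr h

-- each frontier lies on a valid chain of exactly its round index
theorem pvFrontier_depth (d : PySem.Dict String String) (labels : List String) :
    ∀ (j : Nat) (y : String),
      y ∈ ((pvRound d)^[j] (PySem.Set.ofList labels, PySem.Set.ofList labels)).2 →
      ∃ l ∈ labels, y = (pvStep d)^[j] l ∧ ∀ i < j, PySem.Dict.get? d ((pvStep d)^[i] l) ≠ none := by
  intro j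
  induction j with
  | zero =>
    intro y hy
    simp only [Function.iterate_zero, id] at hy
    exact ⟨y, (PySem.Set.mem_ofList labels y).mp hy, rfl,
      fun i hi => absurd hi (Nat.not_lt_zero i)⟩
  | succ j ih =>
    intro y hy
    rw [Function.iterate_succ_apply'] at hy
    simp only [pvRound] at hy
    rw [PySem.Set.mem_diff] at hy
    obtain ⟨h1, _⟩ := hy
    rw [pvParents, pvParents_mem] at h1
    rcases h1 with h | ⟨c, hc, hcy⟩
    · simp [PySem.Set.empty] at h
    · obtain ⟨l, hl, rfl, hvalid⟩ := ih c hc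
      refine ⟨l, hl, ?_, ?_⟩
      · rw [Function.iterate_succ_apply']
        simp [pvStep, hcy]
      · intro i hi
        rcases Nat.lt_succ_iff_lt_or_eq.mp hi with h | rfl
        · exact hvalid i h
        · simp [hcy]

theorem add_parent_labels_eq : ∀ (labels : List String) (child2parent : List (String × String)),
    Pre_add_parent_labels labels child2parent →
    add_parent_labels labels child2parent = add_parent_labels_alt labels child2parent := by
  intro labels cp hpre
  have hQc : ∀ c, pvQ (PySem.Dict.mk cp) labels (cp.length + 1) c →
      ∀ p, PySem.Dict.get? (PySem.Dict.mk cp) c = some p →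
      pvQ (PySem.Dict.mk cp) labels (cp.length + 1) p := by
    intro c hc p hp
    rcases hc with hc | ⟨l, hl, hc⟩
    · exact Or.inr ⟨c, hc, by simp [pvAnc, hp]⟩
    · obtain ⟨k, hk, hke⟩ := hpre l hl
      exact Or.inr ⟨l, hl,
        pvAnc_closed (PySem.Dict.mk cp) (cp.length + 1) l ⟨k, by omega, hke⟩ c hc p hp⟩
  -- the frontier is empty after cp.length + 1 rounds
  have hempty : ((pvRound (PySem.Dict.mk cp))^[cp.length + 1]
      (PySem.Set.ofList labels, PySem.Set.ofList labels)).2 = [] := by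
    rw [List.eq_nil_iff_forall_not_mem]
    intro y hy
    obtain ⟨l, hl, _, hvalid⟩ := pvFrontier_depth (PySem.Dict.mk cp) labels (cp.length + 1) y hy
    obtain ⟨k, hk, hke⟩ := hpre l hl
    exact hvalid k (by omega) hke
  -- B's result is parent-closed
  have hclosed : ∀ c ∈ pvBLoop (PySem.Dict.mk cp) (cp.length + 2)
      (PySem.Set.ofList labels, PySem.Set.ofList labels),
      ∀ p, PySem.Dict.get? (PySem.Dict.mk cp) c = some p →
      p ∈ pvBLoop (PySem.Dict.mk cp) (cp.length + 2)
        (PySem.Set.ofList labels, PySem.Set.ofList labels) := by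
    refine pvBLoop_closed (PySem.Dict.mk cp) (cp.length + 2) _ ?_ ⟨cp.length + 1, by omega, hempty⟩
    intro c hc _ _
    exact Or.inr hc
  -- membership characterisations of the two result sets
  have hBmem : ∀ y, y ∈ pvBLoop (PySem.Dict.mk cp) (cp.length + 2)
      (PySem.Set.ofList labels, PySem.Set.ofList labels) ↔
      pvQ (PySem.Dict.mk cp) labels (cp.length + 1) y := by
    intro y
    constructor
    · intro hy
      refine pvBLoop_sound (PySem.Dict.mk cp) _ hQc (cp.length + 2) _ ?_ ?_ y hy
      · intro z hz; exact Or.inl ((PySem.Set.mem_ofList labels z).mp hz)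
      · intro z hz; exact Or.inl ((PySem.Set.mem_ofList labels z).mp hz)
    · rintro (hy | ⟨l, hl, hy⟩)
      · exact pvBLoop_mono (PySem.Dict.mk cp) (cp.length + 2) _ y
          ((PySem.Set.mem_ofList labels y).mpr hy)
      · refine pvAnc_mem_closed (PySem.Dict.mk cp) _ hclosed (cp.length + 1) l ?_ y hy
        exact pvBLoop_mono (PySem.Dict.mk cp) (cp.length + 2) _ l
          ((PySem.Set.mem_ofList labels l).mpr hl)
  have hAmem : ∀ y, y ∈ labels.foldl
      (fun s l => pvAWalk (PySem.Dict.mk cp) (cp.length + 1) s l) (PySem.Set.ofList labels) ↔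
      pvQ (PySem.Dict.mk cp) labels (cp.length + 1) y := by
    intro y
    rw [pvFoldA_mem, PySem.Set.mem_ofList]
    exact Iff.rfl
  have hAn : (labels.foldl
      (fun s l => pvAWalk (PySem.Dict.mk cp) (cp.length + 1) s l) (PySem.Set.ofList labels)).Nodup :=
    pvFoldA_nodup (PySem.Dict.mk cp) (cp.length + 1) labels _ (PySem.Set.nodup_ofList labels)
  have hBn : (pvBLoop (PySem.Dict.mk cp) (cp.length + 2)
      (PySem.Set.ofList labels, PySem.Set.ofList labels)).Nodup :=
    pvBLoop_nodup (PySem.Dict.mk cp) (cp.length + 2) _ (PySem.Set.nodup_ofList labels)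
  unfold add_parent_labels add_parent_labels_alt
  exact PySem.List.sorted_eq_sorted_of_perm _ _ (fun x => x) (fun a b h => h)
    ((List.perm_ext_iff_of_nodup hAn hBn).mpr (fun y => (hAmem y).trans (hBmem y).symm))

-- ===== VERDICT (by name: the statement is the Claim_ definition above) =====
theorem add_parent_labels_spec : Claim_equal_add_parent_labels := by
  intro labels cp _ hpre
  exact add_parent_labels_eq labels cp hpre
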